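-- pv_equiv track=rewrite | github.com/KathrynWoest/CECS-174-Projects | Project 5: Strings, Version 2/Project Version 2.py | quote_is_abecedarian
-- ===== SOURCE A (Python) =====
-- def is_abecedarian(word):  # K1 - Kathryn Woest
--     """description: sees if the letters in the word are in alphabetical order
--        input: one string (the word)
--        returns: a Boolean value (returns True if the letters are in alphabetical order, returns False if they aren't)"""
--     length = len(word)
--     new_word = word.lower()  # puts the word into lowercase so all values can be accurately compared
--     letter = 0
--     while letter < length - 1:
--         if new_word[letter] > new_word[letter + 1]:  # if the letter is greater than the next one (ex. B, then A)
--             return False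
--         letter += 1
--     return True  # if you go through the whole word, then all letters are in alphabetical order.  return True
--
-- def quote_is_abecedarian(quote):  # K2 - Kathryn Woest
--     """description: returns the number of words in the quote that are in alphabetical order
--        input: one string (the quote)
--        returns: nothing, the function prints the result"""
--     length = len(quote)
--     is_alpha = 0
--     word_location = 0
--     while word_location <= length:
--         new_word_loc = quote.find(" ", word_location)
--         if new_word_loc == -1:
--             new_word = quote[word_location:]
--             alphabetical = is_abecedarian(new_word)  # uses is_abecedarian() to see if the word is in alpha order
--             if alphabetical:  # if the word is in alphabetical order, add to the total count of alphabetical words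
--                 is_alpha += 1
--             break
--         new_word = quote[word_location:new_word_loc]
--         alphabetical = is_abecedarian(new_word)
--         if alphabetical:
--             is_alpha += 1
--         word_location = new_word_loc + 1
--     result = f"The number of words that are in alphabetical order is {is_alpha}."
--     return result
-- ===== SOURCE B (Python) =====
-- def quote_is_abecedarian(quote):
--     count = sum(1 for word in quote.split(' ')
--                 if sorted(word.lower()) == list(word.lower()))
--     return f"The number of words that are in alphabetical order is {count}."
-- ===== Notes on version B (the rewrite author's own statement) =====
-- stated objective: simpler
-- what changed: Replaces the manual find()-position word-parsing loop with str.split on a single-space separator and the pairwise early-exit index scan with a sort-based test (sorted of the lowercased word equals the word itself).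
import Mathlib
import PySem

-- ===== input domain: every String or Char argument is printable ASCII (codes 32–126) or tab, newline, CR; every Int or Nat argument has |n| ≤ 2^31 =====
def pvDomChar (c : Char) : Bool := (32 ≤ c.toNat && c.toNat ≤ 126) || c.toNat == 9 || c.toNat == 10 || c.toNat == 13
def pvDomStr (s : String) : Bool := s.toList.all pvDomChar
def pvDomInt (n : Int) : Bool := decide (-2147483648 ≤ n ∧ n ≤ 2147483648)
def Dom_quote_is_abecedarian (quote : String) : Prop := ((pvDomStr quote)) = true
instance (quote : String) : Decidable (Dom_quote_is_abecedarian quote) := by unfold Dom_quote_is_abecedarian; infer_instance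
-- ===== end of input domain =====

-- B replaces A's find()-position word-parsing loop with a single-space str.split and A's pairwise early-exit
-- index scan with a sort-based test (sorted(w.lower()) == list(w.lower())); simpler, not faster.

-- ===== PORT A =====
-- is_abecedarian's while loop: 'letter' walks the indices; single-char str comparison '>' is
-- code-point comparison, exact as Char '<' here.  The fuel argument only makes the loop total
-- (the entry call passes enough for every iteration the Python loop performs).
def pvIsAbLoop (cs : List Char) (letter : Nat) : Nat → Bool
  | 0 => true
  | fuel + 1 =>
    if letter < cs.length - 1 then
      if cs[letter + 1]! < cs[letter]! then false
      else pvIsAbLoop cs (letter + 1) fuel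
    else true

-- is_abecedarian(word); lower() preserves length, so len(word) = len(new_word) drives the loop
def pvIsAbecedarian (word : List Char) : Bool :=
  let new_word := PySem.Chars.lower word
  pvIsAbLoop new_word 0 new_word.length

-- the while loop of quote_is_abecedarian; word_location stays ≥ 0, kept as Nat;
-- fuel only makes the loop total (word_location strictly grows, so len+1 iterations suffice)
def pvQLoop (cs : List Char) : Nat → Nat → Int → Int
  | 0, _, isAlpha => isAlpha
  | fuel + 1, wordLoc, isAlpha =>
    if wordLoc ≤ cs.length then
      let nwl := PySem.Chars.findFrom cs [' '] (wordLoc : Int) none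
      if nwl = -1 then
        let new_word := PySem.List.slice cs (some (wordLoc : Int)) none
        if pvIsAbecedarian new_word then isAlpha + 1 else isAlpha
      else
        let new_word := PySem.List.slice cs (some (wordLoc : Int)) (some nwl)
        pvQLoop cs fuel (nwl.toNat + 1) (if pvIsAbecedarian new_word then isAlpha + 1 else isAlpha)
    else isAlpha

def quote_is_abecedarian (quote : String) : String :=
  let is_alpha := pvQLoop quote.toList (quote.toList.length + 1) 0 0
  "The number of words that are in alphabetical order is " ++ PySem.Int.toStr is_alpha ++ "."

-- ===== PORT B =====
-- Source B's single-space str.split: hand port of the single-character-separator split (empty pieces kept)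
def pvSplitSp : List Char → List (List Char)
  | [] => [[]]
  | c :: rest =>
    if c = ' ' then [] :: pvSplitSp rest
    else
      match pvSplitSp rest with
      | w :: ws => (c :: w) :: ws
      | [] => [[c]]

-- sorted(word.lower()) == list(word.lower())
def pvAbeSorted (word : List Char) : Bool :=
  let lw := PySem.Chars.lower word
  PySem.List.sorted lw (fun x => x) == lw

def quote_is_abecedarian_alt (quote : String) : String :=
  let count := ((pvSplitSp quote.toList).filter pvAbeSorted).length
  "The number of words that are in alphabetical order is " ++ PySem.Int.toStr (count : Int) ++ "."

-- ===== PRECONDITION & SPEC =====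
def Spec_quote_is_abecedarian (quote : String) (out : String) : Prop := out = quote_is_abecedarian_alt quote
instance (quote : String) (out : String) : Decidable (Spec_quote_is_abecedarian quote out) := by unfold Spec_quote_is_abecedarian; infer_instance

-- ===== CLAIM (what is proved, stated in full; the proofs are below) =====
def Claim_equal_quote_is_abecedarian : Prop := ∀ (quote : String), Dom_quote_is_abecedarian quote → Spec_quote_is_abecedarian quote (quote_is_abecedarian quote)

-- ===== LEMMAS AND PROOFS =====

-- A's index scan starting at `letter` (with enough fuel) accepts iff every
-- adjacent pair from `letter` on is ≤
theorem pvIsAbLoop_eq_true_iff (cs : List Char) (fuel letter : Nat)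
    (hf : cs.length - 1 - letter ≤ fuel) :
    pvIsAbLoop cs letter fuel = true ↔
      ∀ i, letter ≤ i → ∀ (h : i + 1 < cs.length), cs[i] ≤ cs[i+1] := by
  induction fuel generalizing letter with
  | zero =>
    simp only [pvIsAbLoop]
    constructor
    · intro _ i hi hilen
      omega
    · intro _; trivial
  | succ fuel ih =>
    simp only [pvIsAbLoop]
    by_cases h : letter < cs.length - 1
    · rw [if_pos h]
      have hg1 : cs[letter + 1]! = cs[letter + 1]'(by omega) := by
        simp [List.getElem!_eq_getElem?_getD, List.getElem?_eq_getElem (show letter + 1 < cs.length by omega)]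
      have hg0 : cs[letter]! = cs[letter]'(by omega) := by
        simp [List.getElem!_eq_getElem?_getD, List.getElem?_eq_getElem (show letter < cs.length by omega)]
      rw [hg1, hg0]
      by_cases hlt : cs[letter + 1]'(by omega) < cs[letter]'(by omega)
      · rw [if_pos hlt]
        constructor
        · intro hfalse; exact absurd hfalse (by simp)
        · intro hall
          exact absurd (hall letter le_rfl (by omega)) (not_le.mpr hlt)
      · rw [if_neg hlt, ih (letter + 1) (by omega)]
        constructor
        · intro hrest i hi hilen
          rcases Nat.eq_or_lt_of_le hi with rfl | hi'
          · exact le_of_not_gt hlt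
          · exact hrest i hi' hilen
        · intro hall i hi hilen
          exact hall i (by omega) hilen
    · rw [if_neg h]
      constructor
      · intro _ i hi hilen
        omega
      · intro _; rfl

theorem pvIsAbLoop_zero_iff_pairwise (cs : List Char) :
    pvIsAbLoop cs 0 cs.length = true ↔ cs.Pairwise (· ≤ ·) := by
  rw [pvIsAbLoop_eq_true_iff cs cs.length 0 (by omega),
      ← List.isChain_iff_pairwise, List.isChain_iff_getElem]
  constructor
  · intro h i hi; exact h i (Nat.zero_le i) hi
  · intro h i _ hi; exact h i hi

-- the two word predicates agree
theorem pvIsAb_eq_abeSorted (w : List Char) : pvIsAbecedarian w = pvAbeSorted w := by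
  unfold pvIsAbecedarian pvAbeSorted
  by_cases hp : (PySem.Chars.lower w).Pairwise (· ≤ ·)
  · rw [(pvIsAbLoop_zero_iff_pairwise _).mpr hp]
    have := PySem.List.sorted_eq_self_of_pairwise (PySem.Chars.lower w) (fun x => x) (by simpa using hp)
    simp [this]
  · have h1 : pvIsAbLoop (PySem.Chars.lower w) 0 (PySem.Chars.lower w).length = false := by
      cases hb : pvIsAbLoop (PySem.Chars.lower w) 0 (PySem.Chars.lower w).length
      · rfl
      · exact absurd ((pvIsAbLoop_zero_iff_pairwise _).mp hb) hp
    have h2 : (PySem.List.sorted (PySem.Chars.lower w) (fun x => x) == PySem.Chars.lower w) = false := by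
      apply beq_false_of_ne
      intro he
      apply hp
      have := PySem.List.sorted_pairwise (PySem.Chars.lower w) (fun x => x)
      rw [he] at this
      simpa using this
    rw [h1, h2]

-- the split on a space-free list is the single word
theorem pvSplitSp_no_space (cs : List Char) (h : ' ' ∉ cs) : pvSplitSp cs = [cs] := by
  induction cs with
  | nil => rfl
  | cons c rest ih =>
    have hc : c ≠ ' ' := fun hc => h (hc ▸ List.mem_cons_self)
    have hr : ' ' ∉ rest := fun hm => h (List.mem_cons_of_mem _ hm)
    rw [pvSplitSp, if_neg hc, ih hr]

-- the split peels the word before the FIRST space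
theorem pvSplitSp_first_space (cs : List Char) (p : Nat) (hp : p < cs.length)
    (hc : cs[p] = ' ') (hmin : ∀ i (hi : i < p), cs[i]'(by omega) ≠ ' ') :
    pvSplitSp cs = cs.take p :: pvSplitSp (cs.drop (p + 1)) := by
  induction cs generalizing p with
  | nil => simp at hp
  | cons c rest ih =>
    cases p with
    | zero =>
      simp only [List.getElem_cons_zero] at hc
      rw [pvSplitSp, if_pos hc]
      simp
    | succ q =>
      have hc0 : c ≠ ' ' := by
        have := hmin 0 (by omega)
        simpa using this
      rw [pvSplitSp, if_neg hc0]
      have hq : q < rest.length := by simpa using hp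
      have hcq : rest[q] = ' ' := by simpa using hc
      have hminq : ∀ i (hi : i < q), rest[i]'(by omega) ≠ ' ' := by
        intro i hi
        have := hmin (i + 1) (by omega)
        simpa using this
      rw [ih q hq hcq hminq]
      simp

-- find returned -1 from wordLoc: no space in the remainder, A counts the final word
theorem pvQLoop_last_word (cs : List Char) (wordLoc : Nat) (acc : Int)
    (h1 : wordLoc ≤ cs.length)
    (h2 : PySem.Chars.findFrom cs [' '] (wordLoc : Int) none = -1) :
    (if pvIsAbecedarian (PySem.List.slice cs (some (wordLoc : Int)) none) then acc + 1 else acc) =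
      acc + (((pvSplitSp (cs.drop wordLoc)).filter pvAbeSorted).length : Int) := by
  have hno : ¬ [' '] <:+: cs.drop wordLoc :=
    (PySem.Chars.findFrom_natCast_eq_neg_one_iff cs [' '] wordLoc h1).mp h2
  have hmem : ' ' ∉ cs.drop wordLoc := by
    intro hm
    apply hno
    rcases List.mem_iff_append.mp hm with ⟨s, t, hst⟩
    exact ⟨s, t, by rw [hst]; simp⟩
  rw [pvSplitSp_no_space _ hmem, PySem.List.slice_from_natCast, pvIsAb_eq_abeSorted]
  by_cases hb : pvAbeSorted (cs.drop wordLoc)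
  · simp [hb, List.filter]
  · simp [hb, List.filter]

-- the main loop (with enough fuel) counts, over the split of the remaining suffix,
-- the abecedarian words
theorem pvQLoop_eq (cs : List Char) (fuel wordLoc : Nat) (acc : Int)
    (hw : wordLoc ≤ cs.length) (hf : cs.length + 1 - wordLoc ≤ fuel) :
    pvQLoop cs fuel wordLoc acc =
      acc + (((pvSplitSp (cs.drop wordLoc)).filter pvAbeSorted).length : Int) := by
  induction fuel generalizing wordLoc acc with
  | zero => omega
  | succ fuel ih =>
    rw [pvQLoop]
    rw [if_pos hw]
    by_cases h2 : PySem.Chars.findFrom cs [' '] (wordLoc : Int) none = -1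
    · rw [if_pos h2]
      exact pvQLoop_last_word cs wordLoc acc hw h2
    · rw [if_neg h2]
      obtain ⟨hle, hpre, hmin⟩ := PySem.Chars.findFrom_natCast_spec cs [' '] wordLoc hw h2
      set f := PySem.Chars.findFrom cs [' '] (wordLoc : Int) none with hfdef
      have hle' : wordLoc ≤ f.toNat := by omega
      have hflt : f.toNat < cs.length := by
        rcases hpre with ⟨t, ht⟩
        have : (List.drop f.toNat cs).length ≠ 0 := by rw [← ht]; simp
        simp at this; omega
      set rem := cs.drop wordLoc with hrem
      set q := f.toNat - wordLoc with hq
      have hqlen : q < rem.length := by simp [hrem, hq]; omega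
      have hremq : rem[q]'hqlen = ' ' := by
        rcases hpre with ⟨t, ht⟩
        have hd : cs.drop f.toNat = ' ' :: t := by simpa using ht.symm
        have h0 : cs[f.toNat]? = some ' ' := by
          have := congrArg (fun l => l[0]?) hd
          simpa using this
        have hcf : cs[f.toNat]'hflt = ' ' := by
          rw [List.getElem?_eq_getElem hflt] at h0
          exact Option.some.inj h0
        have hri : rem[q]'hqlen = cs[wordLoc + q]'(by omega) := by
          simp [hrem, List.getElem_drop]
        rw [hri]
        have hwq : wordLoc + q = f.toNat := by omega
        simp [hwq, hcf]
      have hremmin : ∀ i (hi : i < q), rem[i]'(by omega) ≠ ' ' := by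
        intro i hi hsp
        apply hmin (wordLoc + i) (by omega) (by omega)
        refine ⟨cs.drop (wordLoc + i + 1), ?_⟩
        have hlt2 : wordLoc + i < cs.length := by omega
        have hcs : cs[wordLoc + i]'hlt2 = ' ' := by
          have hri : rem[i]'(by omega) = cs[wordLoc + i]'hlt2 := by
            simp [hrem]
          rw [← hri]; exact hsp
        rw [← hcs]
        simp [List.getElem_cons_drop]
      rw [pvSplitSp_first_space rem q hqlen hremq hremmin]
      have hslice : PySem.List.slice cs (some (wordLoc : Int)) (some f) = rem.take q := by
        have hfval : f = (wordLoc : Int) + (q : Int) := by omega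
        rw [hfval, PySem.List.slice_natCast_add]
      have hdrop : cs.drop (f.toNat + 1) = rem.drop (q + 1) := by
        simp [hrem, List.drop_drop]; congr 1; omega
      rw [ih (f.toNat + 1) _ (by omega) (by omega), hdrop, hslice, pvIsAb_eq_abeSorted]
      by_cases hb : pvAbeSorted (rem.take q)
      · simp [hb]; ring
      · simp [hb]

-- ===== VERDICT (by name: the statement is the Claim_ definition above) =====
theorem quote_is_abecedarian_spec : Claim_equal_quote_is_abecedarian := by
  intro quote _
  unfold Spec_quote_is_abecedarian quote_is_abecedarian quote_is_abecedarian_alt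
  rw [pvQLoop_eq quote.toList (quote.toList.length + 1) 0 0 (Nat.zero_le _) (by omega)]
  simp
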